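-- pv_equiv track=rewrite | github.com/cffeeSunny/cffeeSunny | week4/TSV_ex_4_padding.py | compute_pad
-- ===== SOURCE A (Python) =====
-- def compute_pad(message: str) -> str:
--     binary_message = ''.join(format(ord(x), '08b') for x in message)
--     n = 0
--     result = ""
--     for i in binary_message:
--         n += 1
--     m_last_block = pow(n, 1, 128)
--     length_m = pow(len(message), 1, (2 ** 8))
--     bin_length_m = bin(length_m)[2:]
--     c = 8 - len(bin_length_m)
--     if c != 0:
--         bin_length_m = "0" * c + bin_length_m
--     else:
--         bin_length_m = bin_length_m
--     padding_length = 128 - 8 - 1 - m_last_block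
--     if padding_length == 0:
--         result = "1" + "0" * 127 + bin_length_m
--     else:
--         result = "1" + "0" * padding_length + bin_length_m
--     if len(result) == 9:
--         result = "1" + "0" * 127 + bin_length_m
--
--     return result
--     pass
-- ===== SOURCE B (Python) =====
-- def compute_pad(message: str) -> str:
--     L = len(message)
--     r = (8 * L) % 128
--     zeros = 127 if r == 120 else 119 - r
--     return "1" + "0" * zeros + format(L % 256, '08b')
-- ===== Notes on version B (the rewrite author's own statement) =====
-- stated objective: faster
-- what changed: B computes the padding length and 8-bit length field directly from len(message) with constant-size arithmetic, instead of building the full binary string of the message and counting its characters in a loop.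
import Mathlib
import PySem

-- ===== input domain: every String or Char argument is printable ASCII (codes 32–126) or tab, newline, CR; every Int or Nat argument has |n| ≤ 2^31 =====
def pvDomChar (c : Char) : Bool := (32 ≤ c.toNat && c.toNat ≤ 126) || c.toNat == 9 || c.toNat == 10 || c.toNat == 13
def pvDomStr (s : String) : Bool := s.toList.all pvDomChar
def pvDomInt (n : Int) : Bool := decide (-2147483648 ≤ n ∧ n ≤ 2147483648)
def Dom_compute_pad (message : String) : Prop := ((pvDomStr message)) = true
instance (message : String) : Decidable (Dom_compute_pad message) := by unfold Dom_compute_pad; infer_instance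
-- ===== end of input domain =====

-- B replaces A's per-bit counting loop over the expanded binary string by a closed form
-- from len(message) alone (objective: faster, O(1) arithmetic instead of O(n) string build).

-- bin(n)[2:] for a Nat: binary digits, most significant first ('0' for 0)
def pyBinAux : Nat → List Char
  | 0 => []
  | n+1 => pyBinAux ((n+1)/2) ++ [if (n+1) % 2 == 1 then '1' else '0']

def pyBin (n : Nat) : List Char := if n = 0 then ['0'] else pyBinAux n

-- format(v, '08b'): binary digits left-padded with '0' to width 8
def fmt08b (v : Nat) : List Char := List.replicate (8 - (pyBin v).length) '0' ++ pyBin v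

-- ===== PORT A =====
def compute_pad (message : String) : String :=
  let binary_message := (message.toList.map (fun x => fmt08b x.toNat)).flatten
  let n := binary_message.foldl (fun acc _ => acc + 1) (0 : Nat)
  let m_last_block := n % 128                -- pow(n, 1, 128)
  let length_m := message.toList.length % 256 -- pow(len(message), 1, 2**8)
  let bin_length_m := pyBin length_m          -- bin(length_m)[2:]
  let c := 8 - bin_length_m.length            -- Nat sub = Python here (length ≤ 8 on Dom; "0"*neg = "" anyway)
  let bin_length_m := if c ≠ 0 then List.replicate c '0' ++ bin_length_m else bin_length_m
  let padding_length : Int := 128 - 8 - 1 - (m_last_block : Int)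
  let result := if padding_length = 0 then '1' :: (List.replicate 127 '0' ++ bin_length_m)
                else '1' :: (List.replicate padding_length.toNat '0' ++ bin_length_m)  -- "0"*neg = ""
  let result := if result.length = 9 then '1' :: (List.replicate 127 '0' ++ bin_length_m) else result
  String.mk result

-- ===== PORT B =====
def compute_pad_alt (message : String) : String :=
  let L := message.toList.length
  let r := (8 * L) % 128
  let zeros := if r = 120 then 127 else 119 - r
  String.mk ('1' :: (List.replicate zeros '0' ++ fmt08b (L % 256)))

-- ===== PRECONDITION & SPEC =====
def Spec_compute_pad (message : String) (out : String) : Prop := out = compute_pad_alt message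
instance (message : String) (out : String) : Decidable (Spec_compute_pad message out) := by unfold Spec_compute_pad; infer_instance

-- ===== CLAIM (what is proved, stated in full; the proofs are below) =====
def Claim_equal_compute_pad : Prop := ∀ (message : String), Dom_compute_pad message → Spec_compute_pad message (compute_pad message)

-- ===== LEMMAS AND PROOFS =====

theorem pyBinAux_length_le (k : Nat) (n : Nat) (h : n < 2 ^ k) : (pyBinAux n).length ≤ k := by
  induction k generalizing n with
  | zero =>
    have : n = 0 := by omega
    simp [this, pyBinAux]
  | succ k ih =>
    match n with
    | 0 => simp [pyBinAux]
    | m + 1 =>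
      have h2 : (m + 1) / 2 < 2 ^ k := by
        have : 2 ^ (k + 1) = 2 * 2 ^ k := by ring
        omega
      have := ih ((m + 1) / 2) h2
      simp [pyBinAux]
      omega

theorem pyBin_length_le (v : Nat) (hv : v < 256) : (pyBin v).length ≤ 8 := by
  by_cases h : v = 0
  · simp [h, pyBin]
  · simpa [pyBin, h] using pyBinAux_length_le 8 v (by norm_num; omega)

theorem fmt08b_length (v : Nat) (hv : v < 256) : (fmt08b v).length = 8 := by
  have h := pyBin_length_le v hv
  simp [fmt08b]
  omega

theorem foldl_count (l : List Char) (a : Nat) :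
    l.foldl (fun acc _ => acc + 1) a = a + l.length := by
  induction l generalizing a with
  | nil => simp
  | cons x xs ih => simp [List.foldl, ih]; omega

theorem binmsg_length (l : List Char) (hdom : l.all pvDomChar = true) :
    (l.map (fun x => fmt08b x.toNat)).flatten.length = 8 * l.length := by
  induction l with
  | nil => simp
  | cons x xs ih =>
    simp only [List.all_cons, Bool.and_eq_true] at hdom
    have hx : x.toNat < 256 := by
      have := hdom.1
      simp [pvDomChar] at this
      omega
    simp [List.map, ih hdom.2, fmt08b_length _ hx]
    ring

theorem pad_if_eq (c : Nat) (s : List Char) :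
    (if c ≠ 0 then List.replicate c '0' ++ s else s) = List.replicate c '0' ++ s := by
  by_cases h : c = 0 <;> simp [h]

-- ===== VERDICT (by name: the statement is the Claim_ definition above) =====
theorem compute_pad_spec : Claim_equal_compute_pad := by
  intro message hdom
  unfold Spec_compute_pad compute_pad compute_pad_alt
  have hdom' : message.toList.all pvDomChar = true := hdom
  simp only [binmsg_length _ hdom', foldl_count, Nat.zero_add, pad_if_eq]
  set L := message.toList.length with hL
  have hbin : (pyBin (L % 256)).length ≤ 8 := pyBin_length_le _ (Nat.mod_lt _ (by norm_num))
  set s := pyBin (L % 256) with hs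
  clear_value s L
  have hr : 8 * L % 128 % 8 = 0 := by omega
  have hrlt : 8 * L % 128 < 128 := by omega
  by_cases h120 : 8 * L % 128 = 120
  · have hp : ((128 : Int) - 8 - 1 - (↑(8 * L % 128) : Int)) = -1 := by
      rw [h120]; norm_num
    rw [hp]
    have ht : ((-1 : Int)).toNat = 0 := rfl
    rw [if_neg (show ¬((-1 : Int) = 0) by norm_num), ht]
    rw [if_pos (by simp only [List.length_cons, List.length_append, List.length_replicate,
          List.replicate_zero, List.nil_append]; omega)]
    simp [h120, fmt08b, ← hs]
  · have hle : 8 * L % 128 ≤ 112 := by omega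
    have hp : ((128 : Int) - 8 - 1 - (↑(8 * L % 128) : Int)) = ((119 - 8 * L % 128 : Nat) : Int) := by
      push_cast; omega
    rw [hp]
    have hne : ((119 - 8 * L % 128 : Nat) : Int) ≠ 0 := by
      have : 119 - 8 * L % 128 ≥ 7 := by omega
      omega
    simp only [if_neg hne, Int.toNat_natCast, fmt08b, ← hs]
    have h7 : 7 ≤ 119 - 8 * L % 128 := by omega
    have hsl : 8 - s.length + s.length = 8 := by omega
    rw [if_neg (by simp only [List.length_cons, List.length_append, List.length_replicate, hsl]; omega),
        if_neg h120]
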